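-- pv_equiv track=rewrite | github.com/John-Yoder/Poker-Equity-Calculator | preflop_db_2.py | get_valid_hand
-- ===== SOURCE A (Python) =====
-- def rank_char_to_int(ch):
--     mapping = {'2':2, '3':3, '4':4, '5':5, '6':6,
--                '7':7, '8':8, '9':9, 'T':10, 'J':11,
--                'Q':12, 'K':13, 'A':14}
--     return mapping[ch.upper()]
--
-- def get_valid_hand(hand_cat, forbidden):
--     suits = ['h','d','c','s']
--     if len(hand_cat) == 2:
--         r = rank_char_to_int(hand_cat[0])
--         for i in range(4):
--             for j in range(i+1,4):
--                 c1 = (r, suits[i])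
--                 c2 = (r, suits[j])
--                 if c1 not in forbidden and c2 not in forbidden:
--                     return [c1, c2]
--         return None
--     elif len(hand_cat) == 3:
--         r1 = rank_char_to_int(hand_cat[0])
--         r2 = rank_char_to_int(hand_cat[1])
--         typ = hand_cat[-1].lower()
--         if r2 > r1:
--             r1, r2 = r2, r1
--         if typ == 's':
--             for s in suits:
--                 c1 = (r1, s)
--                 c2 = (r2, s)
--                 if c1 not in forbidden and c2 not in forbidden:
--                     return [c1, c2]
--             return None
--         elif typ == 'o':
--             for s1 in suits:
--                 for s2 in suits:
--                     if s1 == s2: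
--                         continue
--                     c1 = (r1, s1)
--                     c2 = (r2, s2)
--                     if c1 not in forbidden and c2 not in forbidden:
--                         return [c1, c2]
--             return None
--     return None
-- ===== SOURCE B (Python) =====
-- SUIT_BIT = [('h', 1), ('d', 2), ('c', 4), ('s', 8)]
--
-- def rank_char_to_int(ch):
--     mapping = {'2':2, '3':3, '4':4, '5':5, '6':6,
--                '7':7, '8':8, '9':9, 'T':10, 'J':11,
--                'Q':12, 'K':13, 'A':14}
--     return mapping[ch.upper()]
--
-- def suit_mask(r, forbidden):
--     # 4-bit mask (bit order h,d,c,s) of the suits still available for rank r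
--     return sum(b for s, b in SUIT_BIT if (r, s) not in forbidden)
--
-- def low_bit(m):
--     # lowest set bit of a non-zero mask
--     if m & 1:
--         return 1
--     if m & 2:
--         return 2
--     if m & 4:
--         return 4
--     return 8
--
-- def low_suit(m):
--     # suit of the lowest set bit of a non-zero mask
--     if m & 1:
--         return 'h'
--     if m & 2:
--         return 'd'
--     if m & 4:
--         return 'c'
--     return 's'
--
-- def get_valid_hand(hand_cat, forbidden):
--     if len(hand_cat) == 2:
--         r1 = r2 = rank_char_to_int(hand_cat[0])
--         typ = 'p'
--     elif len(hand_cat) == 3: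
--         r1 = rank_char_to_int(hand_cat[0])
--         r2 = rank_char_to_int(hand_cat[1])
--         typ = hand_cat[-1].lower()
--         if r2 > r1:
--             r1, r2 = r2, r1
--         if typ != 's' and typ != 'o':
--             return None
--     else:
--         return None
--     m1 = suit_mask(r1, forbidden)
--     m2 = suit_mask(r2, forbidden)
--     if typ == 'p':
--         if m1 == 0:
--             return None
--         lo = low_bit(m1)
--         rest = m1 ^ lo
--         if rest:
--             return [(r1, low_suit(lo)), (r2, low_suit(rest))]
--         return None
--     if typ == 's':
--         both = m1 & m2
--         if both:
--             s = low_suit(both)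
--             return [(r1, s), (r2, s)]
--         return None
--     # offsuit: first free suit of r1 paired with first different free suit of r2;
--     # if r2's only free suit is exactly r1's first, use r1's second free suit instead
--     if m1 == 0 or m2 == 0:
--         return None
--     b1 = low_bit(m1)
--     rest2 = m2 & (15 ^ b1)
--     if rest2:
--         return [(r1, low_suit(b1)), (r2, low_suit(rest2))]
--     m1r = m1 ^ b1
--     if m1r:
--         return [(r1, low_suit(m1r)), (r2, low_suit(b1))]
--     return None
-- ===== Notes on version B (the rewrite author's own statement) =====
-- stated objective: alternative
-- what changed: Replaces A's scans over candidate suit pairs (nested i<j index loops, suit loops with membership tests per candidate) by computing a 4-bit availability mask per rank and selecting the hand with closed-form lowest-set-bit arithmetic (pair: lowest two bits of the mask; suited: lowest bit of the AND of both masks; offsuit: lowest bit of r1's mask paired with lowest other bit of r2's mask, falling back to r1's second bit).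
import Mathlib
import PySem

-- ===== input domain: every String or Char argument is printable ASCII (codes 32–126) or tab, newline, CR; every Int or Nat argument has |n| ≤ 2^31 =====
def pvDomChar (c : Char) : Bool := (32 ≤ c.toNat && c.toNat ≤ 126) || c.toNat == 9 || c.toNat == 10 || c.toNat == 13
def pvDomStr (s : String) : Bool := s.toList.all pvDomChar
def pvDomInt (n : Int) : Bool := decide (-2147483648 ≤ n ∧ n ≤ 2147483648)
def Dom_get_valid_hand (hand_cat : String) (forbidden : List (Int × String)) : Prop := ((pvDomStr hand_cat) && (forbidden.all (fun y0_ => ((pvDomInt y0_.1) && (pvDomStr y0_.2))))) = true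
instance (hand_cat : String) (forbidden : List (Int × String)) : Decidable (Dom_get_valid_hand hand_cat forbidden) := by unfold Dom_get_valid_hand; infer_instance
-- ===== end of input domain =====

-- B replaces A's scans over candidate suit pairs by per-rank 4-bit availability masks and
-- closed-form lowest-bit arithmetic picking the hand; objective: alternative algorithm.
-- Python A raises KeyError on non-rank characters; those inputs are outside Pre_ (B raises there too).

-- ===== PORT A =====
-- rank_char_to_int, returning none where Python raises KeyError (excluded by Pre_)
def rankCharToInt? (ch : Char) : Option Int :=
  PySem.Dict.get? (PySem.Dict.ofList
    [('2',2),('3',3),('4',4),('5',5),('6',6),('7',7),('8',8),('9',9),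
     ('T',10),('J',11),('Q',12),('K',13),('A',14)]) (PySem.Chars.upperChar ch)

def pvSuits : List String := ["h","d","c","s"]

-- the pair branch: for i in range(4): for j in range(i+1,4): first pair with both cards free
def pairLoopA (r : Int) (forbidden : List (Int × String)) : Option (List (Int × String)) :=
  (PySem.List.pyRange 0 4 1).findSome? (fun i =>
    (PySem.List.pyRange (i+1) 4 1).findSome? (fun j =>
      match PySem.List.pyGet? pvSuits i, PySem.List.pyGet? pvSuits j with
      | some si, some sj =>
          if (r, si) ∉ forbidden ∧ (r, sj) ∉ forbidden then some [(r, si), (r, sj)] else none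
      | _, _ => none))

-- the suited branch: for s in suits: first suit free for both ranks
def suitedLoopA (r1 r2 : Int) (forbidden : List (Int × String)) : Option (List (Int × String)) :=
  pvSuits.findSome? (fun s =>
    if (r1, s) ∉ forbidden ∧ (r2, s) ∉ forbidden then some [(r1, s), (r2, s)] else none)

-- the offsuit branch: nested loops over suits, skipping s1 == s2
def offLoopA (r1 r2 : Int) (forbidden : List (Int × String)) : Option (List (Int × String)) :=
  pvSuits.findSome? (fun s1 =>
    pvSuits.findSome? (fun s2 =>
      if s1 = s2 then none
      else if (r1, s1) ∉ forbidden ∧ (r2, s2) ∉ forbidden then some [(r1, s1), (r2, s2)] else none))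

def get_valid_hand (hand_cat : String) (forbidden : List (Int × String)) : Option (List (Int × String)) :=
  if PySem.Str.len hand_cat == 2 then
    match PySem.Str.pyGet? hand_cat 0 with
    | none => none
    | some c0 =>
      match rankCharToInt? c0 with
      | none => none   -- Python raises KeyError here; outside Pre_
      | some r => pairLoopA r forbidden
  else if PySem.Str.len hand_cat == 3 then
    match PySem.Str.pyGet? hand_cat 0, PySem.Str.pyGet? hand_cat 1, PySem.Str.pyGet? hand_cat (-1) with
    | some c0, some c1, some cl =>
      match rankCharToInt? c0, rankCharToInt? c1 with
      | some ra, some rb =>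
        let typ := PySem.Chars.lowerChar cl
        let r1 := if rb > ra then rb else ra
        let r2 := if rb > ra then ra else rb
        if typ == 's' then suitedLoopA r1 r2 forbidden
        else if typ == 'o' then offLoopA r1 r2 forbidden
        else none
      | _, _ => none  -- Python raises KeyError here; outside Pre_
    | _, _, _ => none
  else none

-- ===== PORT B =====
-- SUIT_BIT: suit -> its bit (order h,d,c,s)
def pvSuitBits : List (String × Int) := [("h",1),("d",2),("c",4),("s",8)]

-- suit_mask: sum of the bits of suits whose card (r, s) is not forbidden
def suit_maskB (r : Int) (forbidden : List (Int × String)) : Int :=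
  pvSuitBits.foldl (fun m sb => if (r, sb.1) ∈ forbidden then m else m + sb.2) 0

-- low_bit: lowest set bit of a non-zero mask
def low_bitB (m : Int) : Int :=
  if Int.land m 1 ≠ 0 then 1
  else if Int.land m 2 ≠ 0 then 2
  else if Int.land m 4 ≠ 0 then 4
  else 8

-- low_suit: suit of the lowest set bit of a non-zero mask
def low_suitB (m : Int) : String :=
  if Int.land m 1 ≠ 0 then "h"
  else if Int.land m 2 ≠ 0 then "d"
  else if Int.land m 4 ≠ 0 then "c"
  else "s"

-- the tail of Source B's get_valid_hand after r1, r2, typ are fixed: mask arithmetic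
def pickHandB (typ : Char) (r1 r2 : Int) (forbidden : List (Int × String)) : Option (List (Int × String)) :=
  let m1 := suit_maskB r1 forbidden
  let m2 := suit_maskB r2 forbidden
  if typ == 'p' then
    if m1 = 0 then none
    else
      let lo := low_bitB m1
      let rest := Int.xor m1 lo
      if rest ≠ 0 then some [(r1, low_suitB lo), (r2, low_suitB rest)] else none
  else if typ == 's' then
    let both := Int.land m1 m2
    if both ≠ 0 then some [(r1, low_suitB both), (r2, low_suitB both)] else none
  else  -- offsuit
    if m1 = 0 ∨ m2 = 0 then none
    else
      let b1 := low_bitB m1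
      let rest2 := Int.land m2 (Int.xor 15 b1)
      if rest2 ≠ 0 then some [(r1, low_suitB b1), (r2, low_suitB rest2)]
      else
        let m1r := Int.xor m1 b1
        if m1r ≠ 0 then some [(r1, low_suitB m1r), (r2, low_suitB b1)] else none

def get_valid_hand_alt (hand_cat : String) (forbidden : List (Int × String)) : Option (List (Int × String)) :=
  if PySem.Str.len hand_cat == 2 then
    match PySem.Str.pyGet? hand_cat 0 with
    | none => none
    | some c0 =>
      match rankCharToInt? c0 with
      | none => none
      | some r => pickHandB 'p' r r forbidden
  else if PySem.Str.len hand_cat == 3 then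
    match PySem.Str.pyGet? hand_cat 0, PySem.Str.pyGet? hand_cat 1, PySem.Str.pyGet? hand_cat (-1) with
    | some c0, some c1, some cl =>
      match rankCharToInt? c0, rankCharToInt? c1 with
      | some ra, some rb =>
        let typ := PySem.Chars.lowerChar cl
        let r1 := if rb > ra then rb else ra
        let r2 := if rb > ra then ra else rb
        if ¬ typ = 's' ∧ ¬ typ = 'o' then none
        else pickHandB typ r1 r2 forbidden
      | _, _ => none
    | _, _, _ => none
  else none

-- ===== PRECONDITION & SPEC =====
def pvIsRankChar (c : Char) : Bool :=
  ['2','3','4','5','6','7','8','9','T','J','Q','K','A'].contains (PySem.Chars.upperChar c)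

-- Pre_ excludes exactly the inputs on which the Python A raises KeyError in rank_char_to_int
-- (a 2-char category whose first character is not a rank character, or a 3-char category whose
-- first or second character is not one); A returns normally on every other input.
def Pre_get_valid_hand (hand_cat : String) (forbidden : List (Int × String)) : Prop :=
  ((hand_cat.toList.length = 2 ∨ hand_cat.toList.length = 3) →
      (hand_cat.toList[0]?.all fun c => pvIsRankChar c) = true)
  ∧ (hand_cat.toList.length = 3 →
      (hand_cat.toList[1]?.all fun c => pvIsRankChar c) = true)

instance (hand_cat : String) (forbidden : List (Int × String)) : Decidable (Pre_get_valid_hand hand_cat forbidden) := by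
  unfold Pre_get_valid_hand; infer_instance

def pvWitness_get_valid_hand : String × (List (Int × String)) := ("AKs", [(14, "h")])

def Spec_get_valid_hand (hand_cat : String) (forbidden : List (Int × String)) (out : Option (List (Int × String))) : Prop := out = get_valid_hand_alt hand_cat forbidden
instance (hand_cat : String) (forbidden : List (Int × String)) (out : Option (List (Int × String))) : Decidable (Spec_get_valid_hand hand_cat forbidden out) := by unfold Spec_get_valid_hand; infer_instance

-- ===== CLAIM (what is proved, stated in full; the proofs are below) =====
def Claim_equal_get_valid_hand : Prop := ∀ (hand_cat : String) (forbidden : List (Int × String)), Dom_get_valid_hand hand_cat forbidden → Pre_get_valid_hand hand_cat forbidden → Spec_get_valid_hand hand_cat forbidden (get_valid_hand hand_cat forbidden)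

-- ===== LEMMAS AND PROOFS =====

lemma rng04 : PySem.List.pyRange 0 4 1 = [0, 1, 2, 3] := by decide
lemma rng14 : PySem.List.pyRange (0 + 1) 4 1 = [1, 2, 3] := by decide
lemma rng24 : PySem.List.pyRange (1 + 1) 4 1 = [2, 3] := by decide
lemma rng34 : PySem.List.pyRange (2 + 1) 4 1 = [3] := by decide
lemma rng44 : PySem.List.pyRange (3 + 1) 4 1 = [] := by decide
lemma sg0 : PySem.List.pyGet? pvSuits 0 = some "h" := by decide
lemma sg1 : PySem.List.pyGet? pvSuits 1 = some "d" := by decide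
lemma sg2 : PySem.List.pyGet? pvSuits 2 = some "c" := by decide
lemma sg3 : PySem.List.pyGet? pvSuits 3 = some "s" := by decide

lemma pair_eq (r : Int) (f : List (Int × String)) : pairLoopA r f = pickHandB 'p' r r f := by
  unfold pairLoopA
  rw [rng04]
  simp only [List.findSome?_cons, List.findSome?_nil, rng14, rng24, rng34, rng44,
    sg0, sg1, sg2, sg3]
  by_cases h1 : (r, "h") ∈ f <;> by_cases h2 : (r, "d") ∈ f <;>
  by_cases h3 : (r, "c") ∈ f <;> by_cases h4 : (r, "s") ∈ f <;>
    simp [pickHandB, suit_maskB, pvSuitBits, low_bitB, low_suitB, Int.land, Int.xor,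
      h1, h2, h3, h4]

lemma suited_eq (r1 r2 : Int) (f : List (Int × String)) :
    suitedLoopA r1 r2 f = pickHandB 's' r1 r2 f := by
  by_cases h1 : (r1, "h") ∈ f <;> by_cases h2 : (r1, "d") ∈ f <;>
  by_cases h3 : (r1, "c") ∈ f <;> by_cases h4 : (r1, "s") ∈ f <;>
  by_cases g1 : (r2, "h") ∈ f <;> by_cases g2 : (r2, "d") ∈ f <;>
  by_cases g3 : (r2, "c") ∈ f <;> by_cases g4 : (r2, "s") ∈ f <;>
    simp [suitedLoopA, pickHandB, suit_maskB, pvSuitBits, pvSuits, low_suitB, Int.land,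
      h1, h2, h3, h4, g1, g2, g3, g4]

set_option maxHeartbeats 1600000 in
lemma off_eq (r1 r2 : Int) (f : List (Int × String)) :
    offLoopA r1 r2 f = pickHandB 'o' r1 r2 f := by
  by_cases h1 : (r1, "h") ∈ f <;> by_cases h2 : (r1, "d") ∈ f <;>
  by_cases h3 : (r1, "c") ∈ f <;> by_cases h4 : (r1, "s") ∈ f <;>
  by_cases g1 : (r2, "h") ∈ f <;> by_cases g2 : (r2, "d") ∈ f <;>
  by_cases g3 : (r2, "c") ∈ f <;> by_cases g4 : (r2, "s") ∈ f <;>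
    simp [offLoopA, pickHandB, suit_maskB, pvSuitBits, pvSuits, low_bitB, low_suitB,
      Int.land, Int.xor, h1, h2, h3, h4, g1, g2, g3, g4]

-- ===== VERDICT (by name: the statement is the Claim_ definition above) =====
theorem get_valid_hand_spec : Claim_equal_get_valid_hand := by
  intro hand_cat forbidden _ _
  unfold Spec_get_valid_hand get_valid_hand get_valid_hand_alt
  by_cases h2 : (PySem.Str.len hand_cat == 2) = true <;>
  by_cases h3 : (PySem.Str.len hand_cat == 3) = true <;>
    simp only [h2, h3, if_true, if_false, Bool.false_eq_true] <;>
    (repeat' split) <;>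
      first
        | rfl
        | exact pair_eq _ forbidden
        | simp_all [suited_eq, off_eq]
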